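-- pv_equiv track=rewrite | github.com/a8282530/ppdai.com | login.py | setPrivateKey
-- ===== SOURCE A (Python) =====
-- import math, time, base64
--
-- def setPrivateKey(keys: str) -> str:
--     head = '-----BEGIN PUBLIC KEY-----'
--     end = '-----END PUBLIC KEY-----'
--     l: int = 64
--     n: int = math.ceil(len(keys) / l)
--     k: str = '\n'.join([keys[i * l:(i + 1) * l] for i in range(n)])
--     k = f'{head}\n{k}\n{end}'
--     return k
-- ===== SOURCE B (Python) =====
-- def setPrivateKey(keys: str) -> str:
--     chunks = []
--     rest = keys
--     while rest:
--         chunks.append(rest[:64])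
--         rest = rest[64:]
--     return '-----BEGIN PUBLIC KEY-----\n' + '\n'.join(chunks) + '\n-----END PUBLIC KEY-----'
-- ===== Notes on version B (the rewrite author's own statement) =====
-- stated objective: simpler
-- what changed: B consumes the string greedily 64 characters at a time with a while loop instead of computing a ceil-divided chunk count and slicing by index arithmetic.
import Mathlib
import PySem

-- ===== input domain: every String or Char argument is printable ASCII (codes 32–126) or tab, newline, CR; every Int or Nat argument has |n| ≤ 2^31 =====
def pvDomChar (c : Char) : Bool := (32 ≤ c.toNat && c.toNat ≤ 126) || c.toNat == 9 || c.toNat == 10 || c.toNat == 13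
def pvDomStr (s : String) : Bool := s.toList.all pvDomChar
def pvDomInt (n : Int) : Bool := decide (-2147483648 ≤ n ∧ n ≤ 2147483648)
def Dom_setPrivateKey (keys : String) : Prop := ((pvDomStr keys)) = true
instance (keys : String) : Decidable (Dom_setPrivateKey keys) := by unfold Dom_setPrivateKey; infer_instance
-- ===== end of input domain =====

-- B replaces A's ceil-count + index-arithmetic slicing by a greedy take-64/drop-64 loop over the string; objective: simpler.

-- ===== PORT A =====
def setPrivateKey (keys : String) : String :=
  let head := "-----BEGIN PUBLIC KEY-----"
  let endS := "-----END PUBLIC KEY-----"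
  let l : Int := 64
  -- math.ceil(len(keys) / l) ported as the integer ceiling division (exact on in-range lengths)
  let n : Int := -(PySem.Int.floordiv (-(PySem.Str.len keys)) l)
  let k : String := PySem.Str.join "\n"
    ((PySem.List.pyRange 0 n 1).map (fun i => PySem.Str.slice keys (some (i * l)) (some ((i + 1) * l))))
  -- f'{head}\n{k}\n{end}'
  PySem.Str.join "" [head, "\n", k, "\n", endS]

-- ===== PORT B =====
-- the while loop of Source B: chop 64 chars off the front until the rest is empty
def pvChunks : List Char → List String
  | [] => []
  | c :: cs => String.ofList ((c :: cs).take 64) :: pvChunks ((c :: cs).drop 64)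
termination_by cs => cs.length
decreasing_by simp

def setPrivateKey_alt (keys : String) : String :=
  PySem.Str.join "" ["-----BEGIN PUBLIC KEY-----", "\n",
    PySem.Str.join "\n" (pvChunks keys.toList), "\n", "-----END PUBLIC KEY-----"]

-- ===== PRECONDITION & SPEC =====
def Spec_setPrivateKey (keys : String) (out : String) : Prop := out = setPrivateKey_alt keys
instance (keys : String) (out : String) : Decidable (Spec_setPrivateKey keys out) := by unfold Spec_setPrivateKey; infer_instance

-- ===== CLAIM (what is proved, stated in full; the proofs are below) =====
def Claim_equal_setPrivateKey : Prop := ∀ (keys : String), Dom_setPrivateKey keys → Spec_setPrivateKey keys (setPrivateKey keys)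

-- ===== LEMMAS AND PROOFS =====

theorem pvCeil_eq (m : Nat) :
    -(PySem.Int.floordiv (-(m : Int)) 64) = ((m + 63) / 64 : Nat) := by
  rw [PySem.Int.neg_floordiv_neg_eq_iff_of_pos (by norm_num)]
  constructor <;> push_cast <;> omega

theorem pvChunks_eq (cs : List Char) :
    (List.range ((cs.length + 63) / 64)).map
      (fun k => String.ofList ((cs.drop (k * 64)).take 64)) = pvChunks cs := by
  induction cs using pvChunks.induct with
  | case1 => simp [pvChunks]
  | case2 c cs ih =>
    have hlen : ((c :: cs).length + 63) / 64 = (((c :: cs).drop 64).length + 63) / 64 + 1 := by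
      simp only [List.length_drop, List.length_cons]
      omega
    rw [pvChunks, hlen, List.range_succ_eq_map, List.map_cons, List.map_map, ← ih]
    refine List.cons_eq_cons.mpr ⟨by simp, List.map_congr_left ?_⟩
    intro a _
    have h : Nat.succ a * 64 = (63 + a * 64) + 1 := by omega
    simp only [Function.comp, h, List.drop_succ_cons]
    rw [List.drop_drop, Nat.add_comm]

theorem pvChunkA_eq (s : String) (k : Nat) :
    PySem.Str.slice s (some ((k : Int) * 64)) (some (((k : Int) + 1) * 64))
      = String.ofList ((s.toList.drop (k * 64)).take 64) := by
  apply String.toList_injective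
  have h1 : ((k : Int) * 64) = ((k * 64 : Nat) : Int) := by push_cast; ring
  have h2 : (((k : Int) + 1) * 64) = ((k * 64 : Nat) : Int) + ((64 : Nat) : Int) := by
    push_cast; ring
  rw [show (PySem.Str.slice s (some ((k : Int) * 64)) (some (((k : Int) + 1) * 64))).toList
        = PySem.List.slice s.toList (some ((k : Int) * 64)) (some (((k : Int) + 1) * 64)) by
      simp [PySem.Str.slice],
    h1, h2, PySem.List.slice_natCast_add]
  simp

theorem setPrivateKey_eq_alt (keys : String) : setPrivateKey keys = setPrivateKey_alt keys := by
  unfold setPrivateKey setPrivateKey_alt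
  simp only
  have hmaps : List.map (fun i => PySem.Str.slice keys (some (i * 64)) (some ((i + 1) * 64)))
        (List.map (fun k : Nat => (k : Int)) (List.range ((keys.toList.length + 63) / 64)))
      = pvChunks keys.toList := by
    rw [List.map_map, ← pvChunks_eq]
    exact List.map_congr_left (fun k _ => by simpa using pvChunkA_eq keys k)
  rw [PySem.Str.len_eq, pvCeil_eq, PySem.List.pyRange_zero_natCast, hmaps]

-- ===== VERDICT (by name: the statement is the Claim_ definition above) =====
theorem setPrivateKey_spec : Claim_equal_setPrivateKey := by
  intro keys _
  exact setPrivateKey_eq_alt keys
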